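-- pv_equiv track=rewrite | github.com/M-Khasiev/Python228 | Homework/Homework9.py | work
-- ===== SOURCE A (Python) =====
-- def work(t, n):
--     count = 0
--     if n not in t:
--         return ()
--     for i in t:
--         if i == n:
--             count += 1
--     if count > 1:
--         a = t.index(n)
--         b = t.index(n, a + 1)
--         return t[a:b + 1]
--     elif count == 1:
--         a = t.index(n)
--         return t[a:]
-- ===== SOURCE B (Python) =====
-- def work(t, n):
--     a = None
--     for i, x in enumerate(t):
--         if x == n:
--             if a is None:
--                 a = i
--             else:
--                 return t[a:i + 1]
--     if a is None:
--         return ()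
--     return t[a:]
-- ===== Notes on version B (the rewrite author's own statement) =====
-- stated objective: simpler
-- what changed: One enumerate pass tracking the first matching index and returning immediately at the second match, instead of a membership test plus a counting loop plus two .index scans.
import Mathlib
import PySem

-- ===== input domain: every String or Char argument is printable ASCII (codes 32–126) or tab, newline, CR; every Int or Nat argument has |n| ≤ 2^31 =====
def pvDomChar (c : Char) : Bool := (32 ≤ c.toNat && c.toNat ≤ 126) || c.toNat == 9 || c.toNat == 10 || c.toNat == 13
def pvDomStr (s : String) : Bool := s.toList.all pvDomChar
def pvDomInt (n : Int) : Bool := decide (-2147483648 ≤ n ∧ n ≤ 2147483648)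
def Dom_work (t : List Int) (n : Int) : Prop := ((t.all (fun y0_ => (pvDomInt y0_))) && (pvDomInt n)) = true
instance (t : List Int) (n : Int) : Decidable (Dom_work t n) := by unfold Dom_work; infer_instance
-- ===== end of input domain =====

-- B replaces A's membership test + counting loop + two .index scans by a single
-- enumerate pass that records the first matching index and returns at the second (objective: simpler).


-- ===== PORT A =====
def work (t : List Int) (n : Int) : List Int :=
  let count := t.foldl (fun acc i => if i == n then acc + 1 else acc) (0 : Int)
  if ¬ t.contains n then []
  else if count > 1 then
    match PySem.List.index? t n with
    | none => []        -- unreachable: n ∈ t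
    | some a =>
      -- t.index(n, a + 1): exact as a+1 + first index of n in t[a+1:] (found, since count > 1)
      match PySem.List.index? (t.drop (a + 1)) n with
      | none => []      -- unreachable: count > 1 means n occurs after index a
      | some b' =>
        let b : Nat := a + 1 + b'
        PySem.List.slice t (some (a : Int)) (some ((b : Int) + 1))
  else if count == 1 then
    match PySem.List.index? t n with
    | none => []        -- unreachable: n ∈ t
    | some a => PySem.List.slice t (some (a : Int)) none
  else []               -- unreachable (n ∈ t ⇒ count ≥ 1); Python falls off returning None

-- ===== PORT B =====
-- single pass with the running index i and the first matching index a (None until found)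
def workAltGo (t : List Int) (n : Int) : List Int → Nat → Option Nat → List Int
  | [], _, none => []
  | [], _, some a => PySem.List.slice t (some (a : Int)) none
  | x :: rest, i, a =>
    if x == n then
      match a with
      | none => workAltGo t n rest (i + 1) (some i)
      | some a0 => PySem.List.slice t (some (a0 : Int)) (some ((i : Int) + 1))
    else workAltGo t n rest (i + 1) a

def work_alt (t : List Int) (n : Int) : List Int := workAltGo t n t 0 none

-- ===== PRECONDITION & SPEC =====
def Spec_work (t : List Int) (n : Int) (out : List Int) : Prop := out = work_alt t n
instance (t : List Int) (n : Int) (out : List Int) : Decidable (Spec_work t n out) := by unfold Spec_work; infer_instance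

-- ===== CLAIM (what is proved, stated in full; the proofs are below) =====
def Claim_equal_work : Prop := ∀ (t : List Int) (n : Int), Dom_work t n → Spec_work t n (work t n)

-- ===== LEMMAS AND PROOFS =====

-- B's loop with no first index found yet: it finds the first occurrence (if any) and continues with it.
theorem workAltGo_none (t : List Int) (n : Int) (rest : List Int) (i : Nat) :
    workAltGo t n rest i none =
      match PySem.List.index? rest n with
      | none => []
      | some a0 => workAltGo t n (rest.drop (a0 + 1)) (i + a0 + 1) (some (i + a0)) := by
  induction rest generalizing i with
  | nil => simp [workAltGo, PySem.List.index?]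
  | cons x rest ih =>
    by_cases hx : x = n
    · subst hx
      rw [PySem.List.index?_cons_self]
      simp [workAltGo]
    · have hx' : ¬((x == n) = true) := by simp [hx]
      rw [PySem.List.index?_cons_of_ne rest hx]
      simp only [workAltGo, if_neg hx']
      rw [ih (i + 1)]
      cases h : PySem.List.index? rest n with
      | none => simp
      | some a0 =>
        simp only [Option.map_some, List.drop_succ_cons]
        have e1 : i + 1 + a0 + 1 = i + (a0 + 1) + 1 := by omega
        have e2 : i + 1 + a0 = i + (a0 + 1) := by omega
        rw [e1, e2]

-- B's loop after the first occurrence at a0: it returns the slice to the next occurrence, else t[a0:].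
theorem workAltGo_some (t : List Int) (n : Int) (rest : List Int) (i : Nat) (a0 : Nat) :
    workAltGo t n rest i (some a0) =
      match PySem.List.index? rest n with
      | none => PySem.List.slice t (some (a0 : Int)) none
      | some b0 => PySem.List.slice t (some (a0 : Int)) (some ((i : Int) + b0 + 1)) := by
  induction rest generalizing i with
  | nil => simp [workAltGo, PySem.List.index?]
  | cons x rest ih =>
    by_cases hx : x = n
    · subst hx
      rw [PySem.List.index?_cons_self]
      simp [workAltGo]
    · have hx' : ¬((x == n) = true) := by simp [hx]
      rw [PySem.List.index?_cons_of_ne rest hx]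
      simp only [workAltGo, if_neg hx']
      rw [ih (i + 1)]
      cases h : PySem.List.index? rest n with
      | none => simp
      | some b0 =>
        simp only [Option.map_some]
        congr 2
        push_cast
        ring

-- counting loop = list count
theorem count_foldl (t : List Int) (n : Int) :
    t.foldl (fun acc i => if i == n then acc + 1 else acc) (0 : Int) = (t.count n : Int) := by
  simpa using PySem.List.foldl_beq_add_one (l := t) (v := n) (a := (0 : Int))

-- decomposition at the first occurrence: count of the tail after it
theorem count_drop_succ (pre suf : List Int) (n : Int) (hn : n ∉ pre) :
    (pre ++ n :: suf).count n = 1 + suf.count n := by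
  rw [List.count_append, List.count_cons]
  simp [List.count_eq_zero.mpr hn]
  omega

-- ===== VERDICT (by name: the statement is the Claim_ definition above) =====
theorem work_spec : Claim_equal_work := by
  intro t n _
  show work t n = work_alt t n
  unfold work work_alt
  rw [count_foldl]
  by_cases hmem : n ∈ t
  · rw [workAltGo_none]
    have hsome : (PySem.List.index? t n).isSome := (PySem.List.index?_isSome_iff t n).2 hmem
    cases hidx : PySem.List.index? t n with
    | none => rw [hidx] at hsome; simp at hsome
    | some a =>
      obtain ⟨pre, suf, hts, hlen, hnpre⟩ := (PySem.List.index?_eq_some_iff t n a).1 hidx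
      have hdrop : t.drop (a + 1) = suf := by
        subst hts hlen; simp
      have hcount : t.count n = 1 + suf.count n := by
        rw [hts]; exact count_drop_succ pre suf n hnpre
      simp only [hmem, List.contains_eq_mem, decide_true, not_true_eq_false, if_false, hcount]
      rw [workAltGo_some, hdrop]
      cases hsuf : PySem.List.index? suf n with
      | none =>
        have : n ∉ suf := (PySem.List.index?_eq_none_iff suf n).1 hsuf
        have hc0 : suf.count n = 0 := List.count_eq_zero.mpr this
        simp [hc0]
      | some b' =>
        obtain ⟨p2, s2, hsuf2, _, _⟩ := (PySem.List.index?_eq_some_iff suf n b').1 hsuf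
        have : n ∈ suf := by rw [hsuf2]; simp
        have hcpos : 0 < suf.count n := List.count_pos_iff.2 this
        have hgt : (((1 + suf.count n : Nat)) : Int) > 1 := by
          have : (1 : Nat) ≤ suf.count n := hcpos
          push_cast; omega
        rw [if_pos hgt]
        simp only [Nat.zero_add]
        congr 2
  · have hc0 : t.count n = 0 := List.count_eq_zero.mpr hmem
    have hidx : PySem.List.index? t n = none := (PySem.List.index?_eq_none_iff t n).2 hmem
    rw [workAltGo_none, hidx]
    simp [hmem]
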